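-- pv_equiv track=rewrite | github.com/YFC-ophey/Top100BestCoffeeShops | src/scraper.py | _pick_city_from_candidates
-- ===== SOURCE A (Python) =====
-- def _pick_city_from_candidates(candidates):
--     """Pick the city name from a list of (tag_name, text) candidates.
--
--     The city is typically a short string (< 40 chars) appearing
--     after the shop name heading. We skip the first h1/h2 (shop name)
--     and look for the next short text element.
--     """
--     found_title = False
--     for tag_name, text in candidates:
--         # Skip until we find the first h1/h2 (the shop name)
--         if not found_title and tag_name in ("h1", "h2"):
--             found_title = True
--             continue
--         if not found_title:
--             continue
--         # After the title, the next short text is likely the city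
--         if len(text) < 40 and not text.startswith("http"):
--             return text
--     return None
-- ===== SOURCE B (Python) =====
-- def _pick_city_from_candidates(candidates):
--     # Single backwards pass with a two-channel accumulator:
--     # after_title = first short non-URL text in the suffix processed so far,
--     # result      = the answer for a scan starting at this suffix.
--     after_title = None
--     result = None
--     for tag_name, text in reversed(candidates):
--         if tag_name in ("h1", "h2"):
--             result = after_title
--         if len(text) < 40 and not text.startswith("http"):
--             after_title = text
--     return result
-- ===== Notes on version B (the rewrite author's own statement) =====
-- stated objective: alternative
-- what changed: Replaces A's forward scan threaded through a found_title flag with a single backwards pass over the list maintaining a two-channel accumulator (first acceptable text of the suffix, and the answer for a scan starting at that suffix); a title entry snapshots the first channel into the second.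
import Mathlib
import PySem

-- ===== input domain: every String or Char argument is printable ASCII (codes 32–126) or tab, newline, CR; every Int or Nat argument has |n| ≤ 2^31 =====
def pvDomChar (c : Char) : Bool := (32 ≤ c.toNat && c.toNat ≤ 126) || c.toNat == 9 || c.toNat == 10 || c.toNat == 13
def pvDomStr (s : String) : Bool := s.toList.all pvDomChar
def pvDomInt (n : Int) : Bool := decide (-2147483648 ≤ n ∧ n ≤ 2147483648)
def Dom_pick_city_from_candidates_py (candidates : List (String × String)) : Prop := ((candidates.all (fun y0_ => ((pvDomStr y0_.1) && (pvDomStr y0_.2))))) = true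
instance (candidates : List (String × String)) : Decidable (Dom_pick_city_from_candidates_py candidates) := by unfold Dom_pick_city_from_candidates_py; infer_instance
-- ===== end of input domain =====

-- B replaces A's forward flag-threaded scan by a single BACKWARDS pass with a
-- two-channel accumulator (no flag, no early return); alternative, same cost.

-- ===== PORT A =====
-- the for-loop with the found_title flag, as structural recursion over the same state
def pickLoopA (found : Bool) : List (String × String) → Option String
  | [] => none
  | (tag_name, text) :: rest =>
    if !found && (tag_name == "h1" || tag_name == "h2") then
      pickLoopA true rest
    else if !found then
      pickLoopA found rest
    else if PySem.Str.len text < 40 && !PySem.Str.startswith text "http" then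
      some text
    else
      pickLoopA found rest

def pick_city_from_candidates_py (candidates : List (String × String)) : Option String :=
  pickLoopA false candidates

-- ===== PORT B =====
-- one step of the backwards loop body: state = (after_title, result)
def pickStepB (acc : Option String × Option String) (p : String × String) :
    Option String × Option String :=
  let result := if p.1 == "h1" || p.1 == "h2" then acc.1 else acc.2
  let after_title :=
    if PySem.Str.len p.2 < 40 && !PySem.Str.startswith p.2 "http" then some p.2 else acc.1
  (after_title, result)

-- 'for tag_name, text in reversed(candidates): …; return result'
def pick_city_from_candidates_py_alt (candidates : List (String × String)) : Option String :=
  (candidates.reverse.foldl pickStepB (none, none)).2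

-- ===== PRECONDITION & SPEC =====
def Spec_pick_city_from_candidates_py (candidates : List (String × String)) (out : Option String) : Prop := out = pick_city_from_candidates_py_alt candidates
instance (candidates : List (String × String)) (out : Option String) : Decidable (Spec_pick_city_from_candidates_py candidates out) := by unfold Spec_pick_city_from_candidates_py; infer_instance

-- ===== CLAIM (what is proved, stated in full; the proofs are below) =====
def Claim_equal_pick_city_from_candidates_py : Prop := ∀ (candidates : List (String × String)), Dom_pick_city_from_candidates_py candidates → Spec_pick_city_from_candidates_py candidates (pick_city_from_candidates_py candidates)

-- ===== LEMMAS AND PROOFS =====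

-- the backwards fold computes, for the list cs, exactly the pair
-- (A's scan with the flag already set, A's scan from scratch)
theorem foldl_rev_eq (cs : List (String × String)) :
    cs.reverse.foldl pickStepB (none, none) = (pickLoopA true cs, pickLoopA false cs) := by
  induction cs with
  | nil => rfl
  | cons p rest ih =>
    obtain ⟨t, x⟩ := p
    rw [List.reverse_cons, List.foldl_append, ih]
    by_cases ht : (t == "h1" || t == "h2") = true
    · simp [pickStepB, pickLoopA, ht]
    · by_cases hx : (PySem.Str.len x < 40 && !PySem.Str.startswith x "http") = true
      · simp [pickStepB, pickLoopA, ht, hx]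
      · simp [pickStepB, pickLoopA, ht, hx]

-- ===== VERDICT (by name: the statement is the Claim_ definition above) =====
theorem pick_city_from_candidates_py_spec : Claim_equal_pick_city_from_candidates_py := by
  intro cs _
  unfold Spec_pick_city_from_candidates_py pick_city_from_candidates_py pick_city_from_candidates_py_alt
  rw [foldl_rev_eq]
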